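-- pv_equiv track=rewrite | github.com/teddyjfpender/stwo-zig | scripts/profile_smoke.py | hotspot_hints
-- ===== SOURCE A (Python) =====
-- from typing import Any, Dict, List
--
-- def hotspot_hints(hotspots: List[Dict[str, Any]]) -> List[str]:
--     hints: List[str] = []
--
--     def add_hint(msg: str) -> None:
--         if msg not in hints:
--             hints.append(msg)
--
--     for hotspot in hotspots:
--         symbol = hotspot["symbol"].lower()
--         if "frianswers" in symbol or "compute_fri_quotients" in symbol or "quotient" in symbol:
--             add_hint("Prioritize quotient/FRI loop optimization and allocation reuse in PCS decommit paths.")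
--         if "blake2" in symbol or "merkle" in symbol or "hash" in symbol:
--             add_hint("Investigate hashing/Merkle batching and vectorized digest paths.")
--         if "mmap" in symbol or "munmap" in symbol or "alloc" in symbol or "free_" in symbol:
--             add_hint("Reduce allocator churn by reusing large buffers across prove stages.")
--         if "circlepoint" in symbol or "::mul" in symbol:
--             add_hint("Target field/circle multiplication hot loops for SIMD-friendly batching.")
--     return hints[:4]
-- ===== SOURCE B (Python) =====
-- from typing import Any, Dict, List
--
-- RULES = [
--     (("frianswers", "compute_fri_quotients", "quotient"),
--      "Prioritize quotient/FRI loop optimization and allocation reuse in PCS decommit paths."),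
--     (("blake2", "merkle", "hash"),
--      "Investigate hashing/Merkle batching and vectorized digest paths."),
--     (("mmap", "munmap", "alloc", "free_"),
--      "Reduce allocator churn by reusing large buffers across prove stages."),
--     (("circlepoint", "::mul"),
--      "Target field/circle multiplication hot loops for SIMD-friendly batching."),
-- ]
--
-- def hotspot_hints(hotspots: List[Dict[str, Any]]) -> List[str]:
--     # Transposed strategy: for each rule, find the index of the FIRST hotspot
--     # that triggers it; then emit messages bucketed by that first index
--     # (ties within one hotspot resolved by rule order). No mutable dedup list,
--     # no truncation needed: each rule contributes at most once.
--     symbols = [h["symbol"].lower() for h in hotspots]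
--     firsts = [
--         (next((i for i, s in enumerate(symbols) if any(k in s for k in kws)), None), msg)
--         for kws, msg in RULES
--     ]
--     return [msg for i in range(len(symbols)) for f, msg in firsts if f == i]
-- ===== Notes on version B (the rewrite author's own statement) =====
-- stated objective: alternative
-- what changed: B transposes the computation: instead of a single fold over hotspots with a mutable dedup list and a [:4] truncation, it computes for each rule the index of the first hotspot that triggers it, then emits the messages bucketed by that first-trigger index (ties broken by rule order), so no dedup or truncation is needed.
import Mathlib
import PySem

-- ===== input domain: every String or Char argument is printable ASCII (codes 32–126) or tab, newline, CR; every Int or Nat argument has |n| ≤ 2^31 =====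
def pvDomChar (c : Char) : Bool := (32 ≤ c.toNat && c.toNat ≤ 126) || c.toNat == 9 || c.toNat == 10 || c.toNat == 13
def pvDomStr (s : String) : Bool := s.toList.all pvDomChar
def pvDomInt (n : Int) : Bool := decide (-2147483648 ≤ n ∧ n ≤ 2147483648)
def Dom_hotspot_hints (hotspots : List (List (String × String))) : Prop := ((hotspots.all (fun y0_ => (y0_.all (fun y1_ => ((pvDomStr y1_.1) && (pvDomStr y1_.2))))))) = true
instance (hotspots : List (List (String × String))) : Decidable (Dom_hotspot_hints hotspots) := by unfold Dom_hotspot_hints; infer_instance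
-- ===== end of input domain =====

-- B transposes the computation: per-rule first-trigger indices, bucketed by index,
-- instead of A's single fold with a mutable dedup list and [:4] (alternative, same cost).


-- ===== PORT A =====
-- add_hint: append msg if not already present
def addHintA (hints : List String) (msg : String) : List String :=
  if hints.contains msg then hints else hints ++ [msg]

def hotspot_hints (hotspots : List (List (String × String))) : List String :=
  let hints :=
    hotspots.foldl (fun hints hotspot =>
      -- hotspot["symbol"].lower(); Pre_ guarantees the key is present (KeyError otherwise)
      let symbol := PySem.Str.lower ((PySem.Dict.get? (PySem.Dict.mk hotspot) "symbol").getD "")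
      let hints :=
        if PySem.Str.isIn "frianswers" symbol || PySem.Str.isIn "compute_fri_quotients" symbol || PySem.Str.isIn "quotient" symbol then
          addHintA hints "Prioritize quotient/FRI loop optimization and allocation reuse in PCS decommit paths."
        else hints
      let hints :=
        if PySem.Str.isIn "blake2" symbol || PySem.Str.isIn "merkle" symbol || PySem.Str.isIn "hash" symbol then
          addHintA hints "Investigate hashing/Merkle batching and vectorized digest paths."
        else hints
      let hints :=
        if PySem.Str.isIn "mmap" symbol || PySem.Str.isIn "munmap" symbol || PySem.Str.isIn "alloc" symbol || PySem.Str.isIn "free_" symbol then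
          addHintA hints "Reduce allocator churn by reusing large buffers across prove stages."
        else hints
      let hints :=
        if PySem.Str.isIn "circlepoint" symbol || PySem.Str.isIn "::mul" symbol then
          addHintA hints "Target field/circle multiplication hot loops for SIMD-friendly batching."
        else hints
      hints) []
  PySem.List.slice hints none (some 4)

-- ===== PORT B =====
-- the static RULES table of Source B
def rulesB : List (List String × String) :=
  [ (["frianswers", "compute_fri_quotients", "quotient"],
     "Prioritize quotient/FRI loop optimization and allocation reuse in PCS decommit paths."),
    (["blake2", "merkle", "hash"],
     "Investigate hashing/Merkle batching and vectorized digest paths."),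
    (["mmap", "munmap", "alloc", "free_"],
     "Reduce allocator churn by reusing large buffers across prove stages."),
    (["circlepoint", "::mul"],
     "Target field/circle multiplication hot loops for SIMD-friendly batching.") ]

-- next((i for i, s in enumerate(symbols) if any(k in s for k in kws)), None)
def firstHitAux (i : Int) (symbols : List String) (kws : List String) : Option Int :=
  match symbols with
  | [] => none
  | s :: rest =>
      if kws.any (fun k => PySem.Str.isIn k s) then some i else firstHitAux (i + 1) rest kws

def hotspot_hints_alt (hotspots : List (List (String × String))) : List String :=
  let symbols := hotspots.map (fun h => PySem.Str.lower ((PySem.Dict.get? (PySem.Dict.mk h) "symbol").getD ""))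
  let firsts := rulesB.map (fun r => (firstHitAux 0 symbols r.1, r.2))
  (PySem.List.pyRange 0 (symbols.length : Int) 1).flatMap
    (fun i => firsts.filterMap (fun f => if f.1 = some i then some f.2 else none))

-- ===== PRECONDITION & SPEC =====
-- Pre_ excludes inputs where some hotspot dict lacks the "symbol" key: Python A (and B) raise KeyError there.
def Pre_hotspot_hints (hotspots : List (List (String × String))) : Prop :=
  ∀ h ∈ hotspots, (PySem.Dict.get? (PySem.Dict.mk h) "symbol").isSome = true
instance (hotspots : List (List (String × String))) : Decidable (Pre_hotspot_hints hotspots) := by unfold Pre_hotspot_hints; infer_instance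
def pvWitness_hotspot_hints : (List (List (String × String))) := [[("symbol", "quotient")]]

def Spec_hotspot_hints (hotspots : List (List (String × String))) (out : List String) : Prop := out = hotspot_hints_alt hotspots
instance (hotspots : List (List (String × String))) (out : List String) : Decidable (Spec_hotspot_hints hotspots out) := by unfold Spec_hotspot_hints; infer_instance

-- ===== CLAIM (what is proved, stated in full; the proofs are below) =====
def Claim_equal_hotspot_hints : Prop := ∀ (hotspots : List (List (String × String))), Dom_hotspot_hints hotspots → Pre_hotspot_hints hotspots → Spec_hotspot_hints hotspots (hotspot_hints hotspots)

-- ===== LEMMAS AND PROOFS =====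
def fires (s : String) (kws : List String) : Bool := kws.any (fun k => PySem.Str.isIn k s)
def symOf (h : List (String × String)) : String :=
  PySem.Str.lower ((PySem.Dict.get? (PySem.Dict.mk h) "symbol").getD "")
def stepRules (hints : List String) (s : String) : List String :=
  rulesB.foldl (fun hs r => if fires s r.1 && !hs.contains r.2 then hs ++ [r.2] else hs) hints
def Acore (symbols : List String) : List String := symbols.foldl stepRules []
def newMsgs (hints : List String) (s : String) : List String :=
  (rulesB.filter (fun r => fires s r.1 && !hints.contains r.2)).map Prod.snd
def BcoreInner (symbols : List String) (i : Int) : List String :=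
  rulesB.filterMap (fun r => if firstHitAux 0 symbols r.1 = some i then some r.2 else none)
def Bcore (symbols : List String) : List String :=
  (PySem.List.pyRange 0 (symbols.length : Int) 1).flatMap (BcoreInner symbols)

theorem addRule (c : Bool) (h : List String) (m : String) :
    (if (c && !h.contains m) = true then h ++ [m] else h) =
    (if c = true then addHintA h m else h) := by
  cases c <;> cases hc : h.contains m <;> simp_all [addHintA, List.contains_eq_mem]

-- A's four inline conditional add_hints = the fold of stepRules over the rules table
theorem step_eq (hints : List String) (s : String) :
    (let hints :=
       if PySem.Str.isIn "frianswers" s || PySem.Str.isIn "compute_fri_quotients" s || PySem.Str.isIn "quotient" s then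
         addHintA hints "Prioritize quotient/FRI loop optimization and allocation reuse in PCS decommit paths."
       else hints
     let hints :=
       if PySem.Str.isIn "blake2" s || PySem.Str.isIn "merkle" s || PySem.Str.isIn "hash" s then
         addHintA hints "Investigate hashing/Merkle batching and vectorized digest paths."
       else hints
     let hints :=
       if PySem.Str.isIn "mmap" s || PySem.Str.isIn "munmap" s || PySem.Str.isIn "alloc" s || PySem.Str.isIn "free_" s then
         addHintA hints "Reduce allocator churn by reusing large buffers across prove stages."
       else hints
     let hints :=
       if PySem.Str.isIn "circlepoint" s || PySem.Str.isIn "::mul" s then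
         addHintA hints "Target field/circle multiplication hot loops for SIMD-friendly batching."
       else hints
     hints) = stepRules hints s := by
  simp only [stepRules, rulesB, fires, List.foldl_cons, List.foldl_nil, List.any_cons,
    List.any_nil, Bool.or_false, Bool.or_assoc, addRule]

theorem foldGen (rules : List (List String × String)) (hnd : (rules.map Prod.snd).Nodup)
    (hints : List String) (s : String) :
    rules.foldl (fun hs r => if fires s r.1 && !hs.contains r.2 then hs ++ [r.2] else hs) hints
    = hints ++ (rules.filter (fun r => fires s r.1 && !hints.contains r.2)).map Prod.snd := by
  induction rules generalizing hints with
  | nil => simp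
  | cons r rs ih =>
    simp only [List.map_cons, List.nodup_cons] at hnd
    obtain ⟨hr, hnd⟩ := hnd
    have hfc : ∀ a ∈ rs, (fires s a.1 && !(hints ++ [r.2]).contains a.2)
        = (fires s a.1 && !hints.contains a.2) := by
      intro a ha
      have : a.2 ≠ r.2 := fun h => hr (h ▸ List.mem_map_of_mem ha)
      simp [List.contains_eq_mem, this]
    by_cases c : (fires s r.1 && !hints.contains r.2) = true
    · simp only [List.foldl_cons, c, if_pos]
      rw [ih hnd, List.filter_congr hfc]
      have c' := c
      simp only [List.contains_eq_mem, Bool.and_eq_true,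
        Bool.not_eq_true'] at c'
      simp [c'.1, c'.2]
    · rw [List.foldl_cons, if_neg c, ih hnd, List.filter_cons, if_neg c]


theorem stepRules_eq (hints : List String) (s : String) :
    stepRules hints s = hints ++ newMsgs hints s := by
  exact foldGen rulesB (by decide) hints s


theorem mem_Acore (symbols : List String) (m : String) :
    m ∈ Acore symbols ↔ ∃ r ∈ rulesB, r.2 = m ∧ ∃ s ∈ symbols, fires s r.1 = true := by
  induction symbols using List.reverseRecOn generalizing m with
  | nil => simp [Acore]
  | append_singleton sy s ih =>
    have hstep : Acore (sy ++ [s]) = Acore sy ++ newMsgs (Acore sy) s := by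
      simp [Acore, List.foldl_append, stepRules_eq]
    rw [hstep]
    simp only [List.mem_append, ih, newMsgs, List.mem_map, List.mem_filter]
    constructor
    · rintro (⟨r, hr, hm, s', hs', hf⟩ | ⟨r, ⟨hr, hc⟩, hm⟩)
      · exact ⟨r, hr, hm, s', by simp [hs'], hf⟩
      · have hf : fires s r.1 = true := by
          have h2 := hc; simp only [Bool.and_eq_true] at h2; exact h2.1
        exact ⟨r, hr, hm, s, by simp, hf⟩
    · rintro ⟨r, hr, hm, s', hs', hf⟩
      rcases hs' with h | h
      · exact Or.inl ⟨r, hr, hm, s', h, hf⟩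
      · have hs'' : s' = s := by simpa using h
        subst hs''
        by_cases hc : (Acore sy).contains r.2 = true
        · left
          obtain ⟨r', hr', hm', s'', hs'', hf''⟩ := (ih r.2).1 (by simpa [List.contains_eq_mem] using hc)
          exact ⟨r', hr', hm'.trans hm, s'', hs'', hf''⟩
        · right
          refine ⟨r, ⟨hr, ?_⟩, hm⟩
          simp only [List.contains_eq_mem] at hc
          simp [hf, hc]

theorem contains_Acore (symbols : List String) (r : List String × String) (hr : r ∈ rulesB) :
    (Acore symbols).contains r.2 = true ↔ ∃ s ∈ symbols, fires s r.1 = true := by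
  simp only [List.contains_eq_mem, decide_eq_true_eq, mem_Acore]
  constructor
  · rintro ⟨r', hr', he, s, hs, hf⟩
    have : r' = r := List.inj_on_of_nodup_map (f := Prod.snd) (by decide) hr' hr he
    exact ⟨s, hs, this ▸ hf⟩
  · rintro ⟨s, hs, hf⟩
    exact ⟨r, hr, rfl, s, hs, hf⟩


theorem firstHitAux_cons (j : Int) (a : String) (t : List String) (kws : List String) :
    firstHitAux j (a :: t) kws = if fires a kws then some j else firstHitAux (j + 1) t kws := rfl

theorem fh_none (kws : List String) (j : Int) (sy : List String) :
    firstHitAux j sy kws = none ↔ ∀ s ∈ sy, fires s kws = false := by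
  induction sy generalizing j with
  | nil => simp [firstHitAux]
  | cons a t ih =>
    rw [firstHitAux_cons]
    by_cases hf : fires a kws = true
    · rw [if_pos hf]
      constructor
      · intro h; exact absurd h (by simp)
      · intro h; exact absurd (h a (List.mem_cons_self ..)) (by simp [hf])
    · rw [if_neg hf, ih]
      constructor
      · intro h s hs
        rcases List.mem_cons.1 hs with rfl | hs'
        · revert hf; cases fires s kws <;> simp
        · exact h s hs'
      · intro h s hs; exact h s (List.mem_cons_of_mem _ hs)

theorem fh_append (kws : List String) (j : Int) (sy : List String) (s : String) :
    firstHitAux j (sy ++ [s]) kws =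
      (firstHitAux j sy kws).or (if fires s kws then some (j + sy.length) else none) := by
  induction sy generalizing j with
  | nil =>
    rw [List.nil_append, firstHitAux_cons]
    by_cases hf : fires s kws = true
    · rw [if_pos hf]; simp [firstHitAux, hf]
    · rw [if_neg hf]; simp [firstHitAux, hf]
  | cons a t ih =>
    rw [List.cons_append, firstHitAux_cons, firstHitAux_cons]
    by_cases hf : fires a kws = true
    · rw [if_pos hf, if_pos hf]; rfl
    · rw [if_neg hf, if_neg hf, ih (j + 1)]
      have hlen : j + 1 + (t.length : Int) = j + ((a :: t).length : Int) := by
        simp [List.length_cons]; ring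
      rw [hlen]

theorem fh_lt (kws : List String) (j : Int) (sy : List String) (i : Int)
    (h : firstHitAux j sy kws = some i) : j ≤ i ∧ i < j + sy.length := by
  induction sy generalizing j with
  | nil => simp [firstHitAux] at h
  | cons a t ih =>
    rw [firstHitAux_cons] at h
    by_cases hf : fires a kws = true
    · rw [if_pos hf, Option.some.injEq] at h
      subst h; simp only [List.length_cons]; push_cast; omega
    · rw [if_neg hf] at h
      have := ih (j + 1) h
      simp only [List.length_cons]
      push_cast
      omega

theorem BcoreInner_stable (sy : List String) (s : String) (i : Int) (hi : i < (sy.length : Int)) :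
    BcoreInner (sy ++ [s]) i = BcoreInner sy i := by
  unfold BcoreInner
  apply List.filterMap_congr
  intro r _
  rw [fh_append]
  cases hfh : firstHitAux 0 sy r.1 with
  | some i' => simp
  | none =>
    simp only [Option.none_or]
    by_cases hf : fires s r.1 = true
    · rw [if_pos hf, if_neg (by simp; omega), if_neg (by simp)]
    · rw [if_neg hf]
      rfl


theorem BcoreInner_last (sy : List String) (s : String) :
    BcoreInner (sy ++ [s]) (sy.length : Int) = newMsgs (Acore sy) s := by
  unfold BcoreInner newMsgs
  have hmap : ∀ (l : List (List String × String)) (p : List String × String → Bool),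
      (l.filter p).map Prod.snd = l.filterMap (fun r => if p r = true then some r.2 else none) := by
    intro l p
    induction l with
    | nil => rfl
    | cons a t iht => by_cases hp : p a = true <;> simp [hp, iht]
  rw [hmap]
  apply List.filterMap_congr
  intro r hr
  rw [fh_append]
  cases hfh : firstHitAux 0 sy r.1 with
  | some i' =>
    have hlt := fh_lt r.1 0 sy i' hfh
    have hne : i' ≠ (sy.length : Int) := by omega
    have hcont : (Acore sy).contains r.2 = true := by
      rw [contains_Acore sy r hr]
      by_contra hno
      push Not at hno
      have hn : firstHitAux 0 sy r.1 = none := (fh_none r.1 0 sy).2 (fun s' hs' => by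
        have := hno s' hs'
        revert this; cases fires s' r.1 <;> simp)
      simp [hn] at hfh
    simp only [List.contains_eq_mem, decide_eq_true_eq] at hcont
    simp [hne, hcont]
  | none =>
    have hcont : (Acore sy).contains r.2 = false := by
      rw [Bool.eq_false_iff, Ne, contains_Acore sy r hr]
      intro ⟨s', hs', hf'⟩
      exact absurd ((fh_none r.1 0 sy).1 hfh s' hs') (by simp [hf'])
    simp only [Option.none_or]
    simp only [List.contains_eq_mem, decide_eq_false_iff_not] at hcont
    by_cases hf : fires s r.1 = true
    · simp [hf, hcont]
    · simp [hf, hcont]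


theorem Acore_eq_Bcore (symbols : List String) : Acore symbols = Bcore symbols := by
  induction symbols using List.reverseRecOn with
  | nil =>
    simp [Acore, Bcore, PySem.List.pyRange_one_eq_nil (le_refl 0)]
  | append_singleton sy s ih =>
    have hA : Acore (sy ++ [s]) = Acore sy ++ newMsgs (Acore sy) s := by
      simp [Acore, List.foldl_append, stepRules_eq]
    have hB : Bcore (sy ++ [s]) = Bcore sy ++ newMsgs (Acore sy) s := by
      unfold Bcore
      have hlen : (((sy ++ [s]).length : Nat) : Int) = (sy.length : Int) + 1 := by simp
      rw [hlen, PySem.List.pyRange_one_succ_right (Int.natCast_nonneg _), List.flatMap_append]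
      congr 1
      · exact List.flatMap_congr
          (fun i hi => BcoreInner_stable sy s i ((PySem.List.mem_pyRange_one.1 hi).2))
      · simpa using BcoreInner_last sy s
    rw [hA, hB, ih]


theorem Acore_nodup (symbols : List String) : (Acore symbols).Nodup := by
  induction symbols using List.reverseRecOn with
  | nil => simp [Acore]
  | append_singleton sy s ih =>
    have hA : Acore (sy ++ [s]) = Acore sy ++ newMsgs (Acore sy) s := by
      simp [Acore, List.foldl_append, stepRules_eq]
    rw [hA]
    have hnew : (newMsgs (Acore sy) s).Nodup :=
      (List.Sublist.map Prod.snd List.filter_sublist).nodup (by decide)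
    refine ih.append hnew ?_
    intro a ha hb
    obtain ⟨r, hrf, hre⟩ := List.mem_map.1 hb
    have hc := (List.mem_filter.1 hrf).2
    simp only [Bool.and_eq_true, Bool.not_eq_true', List.contains_eq_mem,
      decide_eq_false_iff_not] at hc
    exact hc.2 (hre ▸ ha)


theorem Acore_len_le (symbols : List String) : (Acore symbols).length ≤ 4 := by
  have hsub : Acore symbols ⊆ rulesB.map Prod.snd := fun m hm => by
    obtain ⟨r, hr, hm2, -⟩ := (mem_Acore symbols m).1 hm
    exact hm2 ▸ List.mem_map_of_mem hr
  have hsp := List.subperm_of_subset (Acore_nodup symbols) hsub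
  simpa [rulesB] using hsp.length_le


-- ===== VERDICT (by name: the statement is the Claim_ definition above) =====
theorem hotspot_hints_spec : Claim_equal_hotspot_hints := by
  intro hotspots _ _
  show hotspot_hints hotspots = hotspot_hints_alt hotspots
  have hA : hotspot_hints hotspots = PySem.List.slice (Acore (hotspots.map symOf)) none (some 4) := by
    unfold hotspot_hints Acore
    refine congrArg (fun l => PySem.List.slice l none (some 4)) ?_
    rw [List.foldl_map]
    exact List.foldl_ext _ _ [] (fun hints hotspot _ => step_eq hints (symOf hotspot))
  have hB : hotspot_hints_alt hotspots = Bcore (hotspots.map symOf) := by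
    unfold hotspot_hints_alt Bcore BcoreInner
    simp only [List.filterMap_map]
    rfl
  rw [hA, hB, ← Acore_eq_Bcore]
  rw [PySem.List.slice_to _ (b := 4) (by omega)]
  exact List.take_of_length_le (by simpa using Acore_len_le _)
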